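-- pv_equiv track=rewrite | github.com/wang-ha-ha/python | wb_web/protocol_rs.py | bulid_frame_basis
-- ===== SOURCE A (Python) =====
-- def crc16(x, invert):
--     a = 0xFFFF
--     b = 0x8408
--     for byte in x:
--         # a ^= ord(byte)
--         a ^= byte
--         for i in range(8):
--             last = a % 2
--             a >>= 1
--             if last == 1:
--                 a ^= b
--     return a
--
-- SOF =       0xC0
--
-- EOF =       0xC1
--
-- TRANSFER =  0x7D
--
-- XOR =       0x20
--
-- def bulid_frame_basis(id, type, strcmd, data=[]):
--     buf = [id, type, ord(strcmd[0]), ord(strcmd[1])]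
--
--     if len(data) > 0:
--         buf.extend(data)
--     # strcrc = crc16(buf, True)
--     crc = crc16(buf, True)
--     # buf.append(int(strcrc[0:2], 16))
--     # buf.append(int(strcrc[2:4], 16))
--     buf.append(crc & 0xFF)
--     buf.append((crc >> 8) & 0xFF)
--
--     frame = [SOF]
--     for byte in buf:
--         if (byte == SOF or byte == EOF or byte == TRANSFER):
--             frame.append(TRANSFER)
--             frame.append(byte ^ XOR)
--         else:
--             frame.append(byte)
--     frame.append(EOF)
--
--     return frame
-- ===== SOURCE B (Python) =====
-- SOF = 0xC0
-- EOF_ = 0xC1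
-- TRANSFER = 0x7D
-- XOR = 0x20
--
-- # 256-entry lookup table for the reflected CRC-16 polynomial 0x8408.
-- _CRC_TABLE = []
-- for _n in range(256):
--     _a = _n
--     for _ in range(8):
--         _a = (_a >> 1) ^ 0x8408 if _a & 1 else _a >> 1
--     _CRC_TABLE.append(_a)
--
-- def _crc16(xs):
--     a = 0xFFFF
--     for byte in xs:
--         v = a ^ byte
--         a = (v >> 8) ^ _CRC_TABLE[v & 0xFF]
--     return a
--
-- def _stuff(byte):
--     if byte in (SOF, EOF_, TRANSFER):
--         return [TRANSFER, byte ^ XOR]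
--     return [byte]
--
-- def bulid_frame_basis(id, type, strcmd, data=[]):
--     buf = [id, type, ord(strcmd[0]), ord(strcmd[1])] + list(data)
--     crc = _crc16(buf)
--     buf.append(crc & 0xFF)
--     buf.append((crc >> 8) & 0xFF)
--     return [SOF] + [b for x in buf for b in _stuff(x)] + [EOF_]
-- ===== Notes on version B (the rewrite author's own statement) =====
-- stated objective: faster
-- what changed: Replaces the per-bit CRC-16 inner loop (8 shift/xor iterations per byte) with a precomputed 256-entry lookup table folded once per byte (using v=(a^byte), a=(v>>8)^TABLE[v&0xFF], which stays exact for non-byte-sized ints), and builds the stuffed frame by concatenating per-byte chunks instead of an accumulator loop.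
import Mathlib
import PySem

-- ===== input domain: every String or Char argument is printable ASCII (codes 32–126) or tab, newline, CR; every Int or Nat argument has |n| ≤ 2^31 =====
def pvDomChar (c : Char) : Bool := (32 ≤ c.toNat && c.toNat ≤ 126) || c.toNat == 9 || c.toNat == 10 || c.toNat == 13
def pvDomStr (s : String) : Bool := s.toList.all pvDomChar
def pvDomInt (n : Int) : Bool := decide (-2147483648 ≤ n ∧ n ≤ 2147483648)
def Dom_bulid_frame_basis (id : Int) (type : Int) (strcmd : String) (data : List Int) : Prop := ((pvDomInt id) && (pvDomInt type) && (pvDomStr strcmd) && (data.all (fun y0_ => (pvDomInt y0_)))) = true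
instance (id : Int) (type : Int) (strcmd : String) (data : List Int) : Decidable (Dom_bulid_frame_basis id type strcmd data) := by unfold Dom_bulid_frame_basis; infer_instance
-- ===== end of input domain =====

-- B replaces A's per-bit CRC-16 inner loop (8 shift/xor steps per byte) by a precomputed
-- 256-entry lookup table folded once per byte, and builds the stuffed frame by flatMap.

-- ===== PORT A =====
-- one iteration of A's inner `for i in range(8)` loop body
def crcStep (a : Int) : Int :=
  let last := PySem.Int.mod a 2
  let a := a >>> (1 : Nat)
  if last = 1 then PySem.Int.bxor a 0x8408 else a

-- port of A's crc16 (parameter `invert` is unused by A as well)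
def crc16A (x : List Int) (invert : Bool) : Int :=
  x.foldl (fun a byte =>
    (List.range 8).foldl (fun a _i => crcStep a) (PySem.Int.bxor a byte)) 0xFFFF

def bulid_frame_basis (id : Int) (type : Int) (strcmd : String) (data : List Int) : List Int :=
  match PySem.Str.pyGet? strcmd 0, PySem.Str.pyGet? strcmd 1 with
  | some c0, some c1 =>
    let buf := [id, type, (c0.toNat : Int), (c1.toNat : Int)]
    let buf := if 0 < data.length then buf ++ data else buf
    let crc := crc16A buf true
    let buf := (buf ++ [PySem.Int.band crc 0xFF]) ++ [PySem.Int.band (crc >>> (8 : Nat)) 0xFF]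
    let frame := buf.foldl (fun frame byte =>
      if byte = 0xC0 ∨ byte = 0xC1 ∨ byte = 0x7D then
        (frame ++ [0x7D]) ++ [PySem.Int.bxor byte 0x20]
      else frame ++ [byte]) [0xC0]
    frame ++ [0xC1]
  | _, _ => []  -- strcmd shorter than 2: Python raises IndexError (excluded by Pre_)

-- ===== PORT B =====
-- one iteration of Source B's table-generation inner loop body
def crcTabStep (a : Int) : Int :=
  if PySem.Int.band a 1 ≠ 0 then PySem.Int.bxor (a >>> (1 : Nat)) 0x8408 else a >>> (1 : Nat)

-- the precomputed 256-entry table _CRC_TABLE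
def crcTable : List Int :=
  (List.range 256).map (fun n => (List.range 8).foldl (fun a _ => crcTabStep a) (Int.ofNat n))

-- Source B's _crc16: one table lookup per byte
def crc16B (xs : List Int) : Int :=
  xs.foldl (fun a byte =>
    let v := PySem.Int.bxor a byte
    PySem.Int.bxor (v >>> (8 : Nat))
      ((PySem.List.pyGet? crcTable (PySem.Int.band v 255)).getD 0)) 0xFFFF

-- Source B's _stuff
def stuffB (byte : Int) : List Int :=
  if byte = 0xC0 ∨ byte = 0xC1 ∨ byte = 0x7D then [0x7D, PySem.Int.bxor byte 0x20] else [byte]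

def bulid_frame_basis_alt (id : Int) (type : Int) (strcmd : String) (data : List Int) : List Int :=
  (((PySem.Str.pyGet? strcmd 0).bind (fun c0 =>
    (PySem.Str.pyGet? strcmd 1).map (fun c1 =>
      let buf := [id, type, (c0.toNat : Int), (c1.toNat : Int)] ++ data
      let crc := crc16B buf
      let buf := buf ++ [PySem.Int.band crc 0xFF, PySem.Int.band (crc >>> (8 : Nat)) 0xFF]
      [0xC0] ++ buf.flatMap stuffB ++ [0xC1]))) : Option (List Int)).getD []

-- ===== PRECONDITION & SPEC =====
-- Pre_ excludes strcmd with fewer than 2 characters: there Python A raises IndexError at strcmd[0] / strcmd[1].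
def Pre_bulid_frame_basis (id : Int) (type : Int) (strcmd : String) (data : List Int) : Prop :=
  2 ≤ strcmd.toList.length
instance (id : Int) (type : Int) (strcmd : String) (data : List Int) : Decidable (Pre_bulid_frame_basis id type strcmd data) := by unfold Pre_bulid_frame_basis; infer_instance

def pvWitness_bulid_frame_basis : Int × Int × String × List Int := (1, 2, "AB", [3, 200])

def Spec_bulid_frame_basis (id : Int) (type : Int) (strcmd : String) (data : List Int) (out : List Int) : Prop := out = bulid_frame_basis_alt id type strcmd data
instance (id : Int) (type : Int) (strcmd : String) (data : List Int) (out : List Int) : Decidable (Spec_bulid_frame_basis id type strcmd data out) := by unfold Spec_bulid_frame_basis; infer_instance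

-- ===== CLAIM (what is proved, stated in full; the proofs are below) =====
def Claim_equal_bulid_frame_basis : Prop := ∀ (id : Int) (type : Int) (strcmd : String) (data : List Int), Dom_bulid_frame_basis id type strcmd data → Pre_bulid_frame_basis id type strcmd data → Spec_bulid_frame_basis id type strcmd data (bulid_frame_basis id type strcmd data)

-- ===== LEMMAS AND PROOFS =====

theorem pvBxorEq (a b : Int) : PySem.Int.bxor a b = Int.xor a b := by
  rcases a with m | m <;> rcases b with n | n <;>
    simp [PySem.Int.bxor, Int.xor, Int.negSucc_eq] <;> omega

theorem pvXorComm (a b : Int) : Int.xor a b = Int.xor b a := by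
  rcases a with m | m <;> rcases b with n | n <;> simp [Int.xor, Nat.xor_comm]

theorem pvXorRightComm (a b c : Int) : Int.xor (Int.xor a b) c = Int.xor (Int.xor a c) b := by
  rcases a with m | m <;> rcases b with n | n <;> rcases c with p | p <;>
    simp [Int.xor, Nat.xor_comm, Nat.xor_left_comm]

theorem pvShiftOne (a : Int) : a >>> (1 : Nat) = Int.div2 a := by
  cases a <;> simp [Int.div2, HShiftRight.hShiftRight, ShiftRight.shiftRight, Int.shiftRight,
    Nat.shiftRight, Nat.div2_val]

theorem pvShiftSucc (a : Int) (k : Nat) : a >>> (k + 1) = (Int.div2 a) >>> k := by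
  cases a <;>
    simp only [Int.div2, HShiftRight.hShiftRight, ShiftRight.shiftRight, Int.shiftRight, Nat.div2_val] <;>
    rw [show ∀ m : Nat, Nat.shiftRight m (k+1) = Nat.shiftRight (m/2) k from
      fun m => Nat.shiftRight_succ_inside m k]

theorem pvMod2 (a : Int) : PySem.Int.mod a 2 = if a.bodd then 1 else 0 := by
  rw [PySem.Int.mod_eq_emod_of_pos (by norm_num : (0:Int) < 2)]
  have h := Int.bodd_add_div2 a
  rw [Int.div2_val] at h
  rcases hb : a.bodd <;> simp [hb] at h ⊢ <;> omega

theorem pvStepBit (b : Bool) (n : Int) :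
    crcStep (Int.bit b n) = if b then Int.xor n 0x8408 else n := by
  unfold crcStep
  simp only [pvMod2, pvShiftOne, Int.bodd_bit, Int.div2_bit, pvBxorEq]
  cases b <;> simp

theorem pvStepXor2 (a q : Int) : crcStep (Int.xor a (2 * q)) = Int.xor (crcStep a) q := by
  have h2q : (2 * q : Int) = Int.bit false q := by simp [Int.bit_val]
  conv_lhs => rw [h2q, ← Int.bit_decomp a, Int.lxor_bit]
  conv_rhs => rw [← Int.bit_decomp a]
  rw [pvStepBit, pvStepBit]
  cases hb : a.bodd <;> simp [pvXorRightComm]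

theorem pvIter (k : Nat) : ∀ a q : Int,
    crcStep^[k] (Int.xor a (q * 2 ^ k)) = Int.xor (crcStep^[k] a) q := by
  induction k with
  | zero => intro a q; simp
  | succ k ih =>
    intro a q
    rw [show (q * 2 ^ (k + 1) : Int) = 2 * (q * 2 ^ k) by ring,
      Function.iterate_succ_apply, Function.iterate_succ_apply, pvStepXor2, ih]

theorem pvDecomp (k : Nat) : ∀ v : Int, Int.xor (v % (2 ^ k)) ((v >>> k) * 2 ^ k) = v := by
  induction k with
  | zero =>
    intro v
    simp [Int.shiftRight_zero]
    rcases v with m|m <;> simp [Int.xor]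
  | succ k ih =>
    intro v
    rw [← Int.bit_decomp v]
    set b := v.bodd
    set w := v.div2 with hw
    have hmod : (Int.bit b w) % (2 ^ (k + 1)) = Int.bit b (w % 2 ^ k) := by
      have hpos : (0 : Int) < 2 ^ k := by positivity
      have hdm := Int.mul_ediv_add_emod w (2 ^ k)
      have h1 : (0 : Int) ≤ w % 2 ^ k := Int.emod_nonneg w (by positivity)
      have h2 : w % 2 ^ k < 2 ^ k := Int.emod_lt_of_pos w hpos
      rcases b <;> simp only [Int.bit_val, Bool.cond_false, Bool.cond_true]
      · rw [show (2 : Int) ^ (k + 1) = 2 * 2 ^ k by ring,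
          show (2 * w + 0 : Int) = (2 * (w % 2 ^ k) + 0) + (2 * 2 ^ k) * (w / 2 ^ k) by
            linear_combination (-2:Int) * hdm,
          Int.add_mul_emod_self_left, Int.emod_eq_of_lt (by omega) (by omega)]
      · rw [show (2 : Int) ^ (k + 1) = 2 * 2 ^ k by ring,
          show (2 * w + 1 : Int) = (2 * (w % 2 ^ k) + 1) + (2 * 2 ^ k) * (w / 2 ^ k) by
            linear_combination (-2:Int) * hdm,
          Int.add_mul_emod_self_left, Int.emod_eq_of_lt (by omega) (by omega)]
    have hshift : (Int.bit b w) >>> (k + 1) = w >>> k := by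
      rw [pvShiftSucc, Int.div2_bit]
    rw [hmod, hshift,
      show ((w >>> k) * 2 ^ (k + 1) : Int) = Int.bit false ((w >>> k) * 2 ^ k) by
        simp [Int.bit_val]; ring,
      Int.lxor_bit, ih w]
    simp

theorem pvStepEq : crcTabStep = crcStep := by
  funext a
  unfold crcTabStep crcStep
  rw [PySem.Int.band_one]
  rcases PySem.Int.mod_two_eq a with h | h <;> rw [h] <;> simp

theorem pvFoldRange8 (a : Int) :
    (List.range 8).foldl (fun a _ => crcStep a) a = crcStep^[8] a := by
  have := List.foldl_const crcStep a (List.range 8)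
  simpa using this

theorem pvBand255 (v : Int) : PySem.Int.band v 255 = v % 256 := by
  have hnat : ∀ m : Nat, m &&& 255 = m % 256 := by
    intro m
    have := Nat.and_two_pow_sub_one_eq_mod m 8
    norm_num at this; omega
  rcases v with m | m <;> simp [PySem.Int.band]
  · rw [hnat]; omega
  · rw [Nat.and_comm, hnat]
    simp [Int.negSucc_eq]
    omega

theorem pvTableLookup (v : Int) :
    (PySem.List.pyGet? crcTable (PySem.Int.band v 255)).getD 0 = crcStep^[8] (v % 256) := by
  have h0 : (0 : Int) ≤ v % 256 := Int.emod_nonneg v (by norm_num)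
  have h1 : v % 256 < 256 := Int.emod_lt_of_pos v (by norm_num)
  set r : Nat := (v % 256).toNat with hr
  have hcast : (r : Int) = v % 256 := by omega
  have hlt : r < 256 := by omega
  rw [pvBand255, ← hcast, PySem.List.pyGet?_natCast]
  unfold crcTable
  rw [List.getElem?_map, List.getElem?_range hlt]
  simp [pvStepEq, pvFoldRange8]

theorem pvByteEq (a byte : Int) :
    (List.range 8).foldl (fun a _i => crcStep a) (PySem.Int.bxor a byte) =
      PySem.Int.bxor ((PySem.Int.bxor a byte) >>> (8 : Nat))
        ((PySem.List.pyGet? crcTable (PySem.Int.band (PySem.Int.bxor a byte) 255)).getD 0) := by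
  rw [pvFoldRange8, pvTableLookup]
  simp only [pvBxorEq]
  set v := Int.xor a byte with hv
  have hdec := pvDecomp 8 v
  norm_num at hdec
  calc crcStep^[8] v = crcStep^[8] (Int.xor (v % 256) ((v >>> (8:Nat)) * 256)) := by rw [hdec]
    _ = Int.xor (crcStep^[8] (v % 256)) (v >>> (8:Nat)) := by
        have h := pvIter 8 (v % 256) (v >>> (8:Nat))
        norm_num at h
        exact h
    _ = Int.xor (v >>> (8:Nat)) (crcStep^[8] (v % 256)) := pvXorComm _ _

theorem pvCrcEq (xs : List Int) : crc16A xs true = crc16B xs := by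
  unfold crc16A crc16B
  congr 1
  funext a byte
  exact pvByteEq a byte

theorem pvStuffEq :
    (fun (frame : List Int) (byte : Int) =>
      if byte = 0xC0 ∨ byte = 0xC1 ∨ byte = 0x7D then
        (frame ++ [0x7D]) ++ [PySem.Int.bxor byte 0x20]
      else frame ++ [byte]) = fun frame byte => frame ++ stuffB byte := by
  funext frame byte
  unfold stuffB
  split <;> simp

-- ===== VERDICT (by name: the statement is the Claim_ definition above) =====
theorem bulid_frame_basis_spec : Claim_equal_bulid_frame_basis := by
  intro id type strcmd data _hDom _hPre
  unfold Spec_bulid_frame_basis bulid_frame_basis bulid_frame_basis_alt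
  have hlen : 2 ≤ strcmd.toList.length := _hPre
  cases h0 : PySem.Str.pyGet? strcmd 0 <;> cases h1 : PySem.Str.pyGet? strcmd 1 <;>
    try (exfalso
         first
         | (rw [show (0:Int) = ((0:Nat):Int) by norm_num, PySem.Str.pyGet?_natCast] at h0
            rw [List.getElem?_eq_none_iff] at h0; omega)
         | (rw [show (1:Int) = ((1:Nat):Int) by norm_num, PySem.Str.pyGet?_natCast] at h1
            rw [List.getElem?_eq_none_iff] at h1; omega))
  simp only [Option.bind_some, Option.map_some, Option.getD_some]
  rename_i c0 c1
  have hbuf : (if 0 < data.length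
        then [id, type, (c0.toNat : Int), (c1.toNat : Int)] ++ data
        else [id, type, (c0.toNat : Int), (c1.toNat : Int)])
      = [id, type, (c0.toNat : Int), (c1.toNat : Int)] ++ data := by
    cases data <;> simp
  rw [hbuf, pvCrcEq, pvStuffEq, PySem.List.foldl_append_eq_flatMap]
  simp [List.append_assoc]
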